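-- pv_equiv track=rewrite | github.com/Sachin926/DSA | shareMAC/DynamicProgramming/recursion/firstCapitalLetter.py | firstCapital
-- ===== SOURCE A (Python) =====
-- def firstCapital(s, n):
-- 	if (n == len(s) - 1):
-- 		if (ord(s[n]) >= 65 and ord(s[n]) <= 92):
-- 			return n
-- 	else:
-- 		if (ord(s[n]) >= 65 and ord(s[n]) <= 92):
-- 			return n
-- 		else:
-- 			return firstCapital(s, n + 1)
-- ===== SOURCE B (Python) =====
-- def firstCapital(s, n):
--     i = n
--     while not (65 <= ord(s[i]) <= 92):
--         if i == len(s) - 1: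
--             return None
--         i += 1
--     return i
-- ===== Notes on version B (the rewrite author's own statement) =====
-- stated objective: simpler
-- what changed: Replaces the recursion (with its duplicated capital test in the two branches of the end-of-string case split) by a single iterative while-scan that tests the 65..92 code once per index and stops at len(s)-1.
import Mathlib
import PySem

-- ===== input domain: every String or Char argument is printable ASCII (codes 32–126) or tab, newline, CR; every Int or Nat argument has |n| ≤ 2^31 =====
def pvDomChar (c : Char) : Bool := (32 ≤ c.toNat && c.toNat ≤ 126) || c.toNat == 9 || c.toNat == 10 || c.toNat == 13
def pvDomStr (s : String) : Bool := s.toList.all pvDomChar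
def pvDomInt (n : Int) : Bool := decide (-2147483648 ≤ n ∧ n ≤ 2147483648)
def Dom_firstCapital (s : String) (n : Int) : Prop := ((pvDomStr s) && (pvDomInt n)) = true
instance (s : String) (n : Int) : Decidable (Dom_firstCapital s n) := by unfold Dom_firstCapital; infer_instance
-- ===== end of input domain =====

-- B replaces A's head recursion (with its duplicated capital test) by a single iterative while-scan; equal wherever A returns.


-- ===== PORT A =====
-- literal port of A's recursion; where Python raises IndexError (pyGet? = none) the port returns none
def firstCapital (s : String) (n : Int) : Option Int :=
  if n = (s.toList.length : Int) - 1 then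
    match PySem.List.pyGet? s.toList n with
    | none => none
    | some c => if 65 ≤ (c.toNat : Int) ∧ (c.toNat : Int) ≤ 92 then some n else none
  else
    match h : PySem.List.pyGet? s.toList n with
    | none => none
    | some c =>
        if 65 ≤ (c.toNat : Int) ∧ (c.toNat : Int) ≤ 92 then some n
        else firstCapital s (n + 1)
termination_by ((s.toList.length : Int) - n).toNat
decreasing_by
  have hin : PySem.Raise.InRange s.toList.length n := by
    by_contra hno
    rw [(PySem.List.pyGet?_eq_none_iff _ _).2 hno] at h
    cases h
  unfold PySem.Raise.InRange at hin
  omega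

-- ===== PORT B =====
-- port of B's while loop: loop variable i, capital test once per index, stop at len(s)-1;
-- where Python raises IndexError (pyGet? = none) the port returns none
def firstCapitalLoop (cs : List Char) (i : Int) : Option Int :=
  match h : PySem.List.pyGet? cs i with
  | none => none
  | some c =>
      if 65 ≤ (c.toNat : Int) ∧ (c.toNat : Int) ≤ 92 then some i
      else if i = (cs.length : Int) - 1 then none
      else firstCapitalLoop cs (i + 1)
termination_by ((cs.length : Int) - i).toNat
decreasing_by
  have hin : PySem.Raise.InRange cs.length i := by
    by_contra hno
    rw [(PySem.List.pyGet?_eq_none_iff _ _).2 hno] at h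
    cases h
  unfold PySem.Raise.InRange at hin
  omega

def firstCapital_alt (s : String) (n : Int) : Option Int :=
  firstCapitalLoop s.toList n

-- ===== PRECONDITION & SPEC =====
-- exactly the inputs on which A returns normally; everywhere else A raises IndexError
def Pre_firstCapital (s : String) (n : Int) : Prop :=
  s.toList ≠ [] ∧ -(s.toList.length : Int) ≤ n ∧ n ≤ (s.toList.length : Int) - 1
instance (s : String) (n : Int) : Decidable (Pre_firstCapital s n) := by
  unfold Pre_firstCapital; infer_instance
def pvWitness_firstCapital : String × Int := ("aB", 0)

def Spec_firstCapital (s : String) (n : Int) (out : Option Int) : Prop := out = firstCapital_alt s n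
instance (s : String) (n : Int) (out : Option Int) : Decidable (Spec_firstCapital s n out) := by
  unfold Spec_firstCapital; infer_instance

-- ===== CLAIM (what is proved, stated in full; the proofs are below) =====
def Claim_equal_firstCapital : Prop :=
  ∀ (s : String) (n : Int), Dom_firstCapital s n → Pre_firstCapital s n →
    Spec_firstCapital s n (firstCapital s n)

-- ===== LEMMAS AND PROOFS =====
-- one-step unfolding of port A when the index is in range
theorem firstCapital_unfold (s : String) (n : Int) (c : Char)
    (hc : PySem.List.pyGet? s.toList n = some c) :
    firstCapital s n =
      if n = (s.toList.length : Int) - 1 then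
        (if 65 ≤ (c.toNat : Int) ∧ (c.toNat : Int) ≤ 92 then some n else none)
      else
        (if 65 ≤ (c.toNat : Int) ∧ (c.toNat : Int) ≤ 92 then some n
         else firstCapital s (n + 1)) := by
  rw [firstCapital]
  split
  · rw [hc]
  · split
    · rename_i hg
      rw [hc] at hg
      cases hg
    · rename_i c' hg
      rw [hc] at hg
      injection hg with h
      subst h
      rfl

-- one-step unfolding of port B's loop when the index is in range
theorem firstCapitalLoop_unfold (cs : List Char) (i : Int) (c : Char)
    (hc : PySem.List.pyGet? cs i = some c) :
    firstCapitalLoop cs i =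
      if 65 ≤ (c.toNat : Int) ∧ (c.toNat : Int) ≤ 92 then some i
      else if i = (cs.length : Int) - 1 then none
      else firstCapitalLoop cs (i + 1) := by
  rw [firstCapitalLoop]
  split
  · rename_i hg
    rw [hc] at hg
    cases hg
  · rename_i c' hg
    rw [hc] at hg
    injection hg with h
    subst h
    rfl

theorem firstCapital_eq_alt (s : String) (n : Int)
    (h1 : -(s.toList.length : Int) ≤ n) (h2 : n ≤ (s.toList.length : Int) - 1) :
    firstCapital s n = firstCapitalLoop s.toList n := by
  generalize hk : ((s.toList.length : Int) - 1 - n).toNat = k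
  induction k generalizing n with
  | zero =>
    have hn : n = (s.toList.length : Int) - 1 := by omega
    obtain ⟨c, hc⟩ : ∃ c, PySem.List.pyGet? s.toList n = some c := by
      cases hg : PySem.List.pyGet? s.toList n with
      | none =>
        exact absurd ((PySem.List.pyGet?_eq_none_iff _ _).1 hg)
          (by unfold PySem.Raise.InRange; omega)
      | some c => exact ⟨c, rfl⟩
    rw [firstCapital_unfold s n c hc, firstCapitalLoop_unfold s.toList n c hc]
    simp only [if_pos hn]
  | succ k ih =>
    have hne : n ≠ (s.toList.length : Int) - 1 := by omega
    obtain ⟨c, hc⟩ : ∃ c, PySem.List.pyGet? s.toList n = some c := by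
      cases hg : PySem.List.pyGet? s.toList n with
      | none =>
        exact absurd ((PySem.List.pyGet?_eq_none_iff _ _).1 hg)
          (by unfold PySem.Raise.InRange; omega)
      | some c => exact ⟨c, rfl⟩
    rw [firstCapital_unfold s n c hc, firstCapitalLoop_unfold s.toList n c hc]
    rw [if_neg hne]
    split
    · rfl
    · exact ih (n + 1) (by omega) (by omega) (by omega)

-- ===== VERDICT (by name: the statement is the Claim_ definition above) =====
theorem firstCapital_spec : Claim_equal_firstCapital := by
  intro s n _ hpre
  exact firstCapital_eq_alt s n hpre.2.1 hpre.2.2
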